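-- pv_equiv track=rewrite | github.com/pypi-data/pypi-mirror-17 | packages/bormeparser/bormeparser-0.2.4.tar.gz/bormeparser-0.2.4/bormeparser/regex.py | regex_empresa_tipo
-- ===== SOURCE A (Python) =====
-- SOCIEDADES = {'AIE': 'Agrupación de Interés Económico',
--               'AEIE': 'Agrupación Europea de Interés Económico',
--               'COOP': 'Cooperativa',
--               'FP': 'Fondo de Pensiones',
--               'SA': 'Sociedad Anónima',
--               'SAD': 'Sociedad Anónima Deportiva',
--               'SAL': 'Sociedad Anónima Laboral',
--               'SAP': 'Sociedad Anónima P?',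
--               'SAS': 'Sociedad por Acciones Simplificada',
--               'SAU': 'Sociedad Anónima Unipersonal',
--               'SC': 'Sociedad Comanditaria',
--               'SCP': 'Sociedad Civil Profesional',
--               'SL': 'Sociedad Limitada',
--               'SLL': 'Sociedad Limitada Laboral',
--               'SLLP': 'Sociedad Limitada Laboral P?',
--               'SLNE': 'Sociedad Limitada Nueva Empresa',
--               'SLP': 'Sociedad Limitada Profesional',
--               'SLU': 'Sociedad Limitada Unipersonal',
--               'SRL': 'Sociedad de Responsabilidad Limitada',
--               'SRLL': 'Sociedad de Responsabilidad Limitada Laboral',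
--               'SRLP': 'Sociedad de Responsabilidad Limitada Profesional',
--               }
--
-- def regex_empresa_tipo(data):
--     empresa = data
--     tipo = ''
--     for t in SOCIEDADES.keys():
--         if data.endswith(' %s' % t):
--             empresa = data[:-len(t) - 1]
--             tipo = t
--             if empresa.endswith(','):
--                 empresa = empresa[:-1]
--     return empresa, tipo
-- ===== SOURCE B (Python) =====
-- SOCIEDADES = {'AIE': 'Agrupación de Interés Económico',
--               'AEIE': 'Agrupación Europea de Interés Económico',
--               'COOP': 'Cooperativa',
--               'FP': 'Fondo de Pensiones',
--               'SA': 'Sociedad Anónima',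
--               'SAD': 'Sociedad Anónima Deportiva',
--               'SAL': 'Sociedad Anónima Laboral',
--               'SAP': 'Sociedad Anónima P?',
--               'SAS': 'Sociedad por Acciones Simplificada',
--               'SAU': 'Sociedad Anónima Unipersonal',
--               'SC': 'Sociedad Comanditaria',
--               'SCP': 'Sociedad Civil Profesional',
--               'SL': 'Sociedad Limitada',
--               'SLL': 'Sociedad Limitada Laboral',
--               'SLLP': 'Sociedad Limitada Laboral P?',
--               'SLNE': 'Sociedad Limitada Nueva Empresa',
--               'SLP': 'Sociedad Limitada Profesional',
--               'SLU': 'Sociedad Limitada Unipersonal',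
--               'SRL': 'Sociedad de Responsabilidad Limitada',
--               'SRLL': 'Sociedad de Responsabilidad Limitada Laboral',
--               'SRLP': 'Sociedad de Responsabilidad Limitada Profesional',
--               }
--
--
-- def regex_empresa_tipo(data):
--     head, sep, last = data.rpartition(' ')
--     if sep and last in SOCIEDADES:
--         if head.endswith(','):
--             head = head[:-1]
--         return head, last
--     return data, ''
-- ===== Notes on version B (the rewrite author's own statement) =====
-- stated objective: idiomatic
-- what changed: Replaces the loop of 21 endswith tests (one per SOCIEDADES key) by a single rpartition(' ') extracting the last space-delimited token followed by one dict membership test.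
import Mathlib
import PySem

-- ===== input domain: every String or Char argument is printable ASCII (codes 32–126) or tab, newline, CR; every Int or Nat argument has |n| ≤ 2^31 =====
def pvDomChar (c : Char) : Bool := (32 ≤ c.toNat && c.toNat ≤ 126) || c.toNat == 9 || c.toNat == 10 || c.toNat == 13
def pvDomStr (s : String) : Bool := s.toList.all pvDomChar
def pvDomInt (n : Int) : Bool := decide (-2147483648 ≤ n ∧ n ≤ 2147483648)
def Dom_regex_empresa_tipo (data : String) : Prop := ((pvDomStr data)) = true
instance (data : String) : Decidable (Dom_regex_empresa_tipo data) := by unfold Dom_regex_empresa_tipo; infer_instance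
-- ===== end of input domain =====

-- B replaces the O(K) loop of endswith tests by one rpartition(' ') plus a single key-membership test (idiomatic).

-- the keys of the module constant SOCIEDADES, in dict (insertion) order; the values are never used by either program
def pvKeys : List String :=
  ["AIE", "AEIE", "COOP", "FP", "SA", "SAD", "SAL", "SAP", "SAS", "SAU", "SC",
   "SCP", "SL", "SLL", "SLLP", "SLNE", "SLP", "SLU", "SRL", "SRLL", "SRLP"]

-- ===== PORT A =====
-- for t in SOCIEDADES.keys(): if data.endswith(' %s' % t): empresa = data[:-len(t)-1]; tipo = t; strip one trailing ','
def regex_empresa_tipo (data : String) : String × String :=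
  pvKeys.foldl (fun st t =>
    if PySem.Chars.endswith data.toList (' ' :: t.toList) then
      let e := PySem.List.slice data.toList none (some (-(t.toList.length : Int) - 1))
      let e := if PySem.Chars.endswith e [','] then PySem.List.slice e none (some (-1)) else e
      (String.ofList e, t)
    else st) (data, "")

-- ===== PORT B =====
-- hand port of data.rpartition(' ') (PySem has no rpartition): some (head, last) when a space exists
-- (split at the RIGHTMOST space: head ++ ' ' :: last with no space in last), none when data has no space
-- (Python's ('', '', data) case). Exact on all strings.
def pvRpartSpace : List Char → Option (List Char × List Char)
  | [] => none
  | c :: cs =>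
    match pvRpartSpace cs with
    | some (h, t) => some (c :: h, t)
    | none => if c = ' ' then some ([], cs) else none

def regex_empresa_tipo_alt (data : String) : String × String :=
  match pvRpartSpace data.toList with
  | none => (data, "")          -- sep == ''
  | some (h, last) =>
    if pvKeys.contains (String.ofList last) then   -- last in SOCIEDADES (dict membership = key membership)
      let h' := if PySem.Chars.endswith h [','] then h.dropLast else h   -- head[:-1]
      (String.ofList h', String.ofList last)
    else (data, "")

-- ===== PRECONDITION & SPEC =====
def Spec_regex_empresa_tipo (data : String) (out : String × String) : Prop := out = regex_empresa_tipo_alt data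
instance (data : String) (out : String × String) : Decidable (Spec_regex_empresa_tipo data out) := by unfold Spec_regex_empresa_tipo; infer_instance

-- ===== CLAIM (what is proved, stated in full; the proofs are below) =====
def Claim_equal_regex_empresa_tipo : Prop := ∀ (data : String), Dom_regex_empresa_tipo data → Spec_regex_empresa_tipo data (regex_empresa_tipo data)

-- ===== LEMMAS AND PROOFS =====

lemma pvRpart_none {l : List Char} (hr : pvRpartSpace l = none) : ' ' ∉ l := by
  induction l with
  | nil => simp
  | cons c cs ih =>
    simp only [pvRpartSpace] at hr
    cases hcs : pvRpartSpace cs with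
    | some p => rw [hcs] at hr; exact absurd hr (by cases p; simp)
    | none =>
      rw [hcs] at hr
      by_cases hc : c = ' '
      · simp [hc] at hr
      · simp only [List.mem_cons]
        rintro (rfl | hm)
        · exact hc rfl
        · exact ih hcs hm

lemma pvRpart_some {l h t : List Char} (hr : pvRpartSpace l = some (h, t)) :
    l = h ++ ' ' :: t ∧ ' ' ∉ t := by
  induction l generalizing h t with
  | nil => simp [pvRpartSpace] at hr
  | cons c cs ih =>
    simp only [pvRpartSpace] at hr
    cases hcs : pvRpartSpace cs with
    | some p =>
      obtain ⟨h0, t0⟩ := p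
      rw [hcs] at hr
      simp only [Option.some.injEq, Prod.mk.injEq] at hr
      obtain ⟨rfl, rfl⟩ := hr
      obtain ⟨he, hn⟩ := ih hcs
      exact ⟨by simp [he], hn⟩
    | none =>
      rw [hcs] at hr
      by_cases hc : c = ' '
      · subst hc
        simp only [if_pos rfl] at hr
        obtain ⟨rfl, rfl⟩ := hr
        exact ⟨rfl, pvRpart_none hcs⟩
      · simp [hc] at hr

-- only the rightmost token can match: a suffix ' ' :: t of h ++ ' ' :: tl with spaceless t, tl forces t = tl
lemma pvSuffix_unique {h tl t : List Char} (htl : ' ' ∉ tl) (ht : ' ' ∉ t)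
    (hs : (' ' :: t) <:+ (h ++ ' ' :: tl)) : t = tl := by
  have htl_suf : (' ' :: tl) <:+ (h ++ ' ' :: tl) := List.suffix_append_of_suffix (List.suffix_refl _)
  rcases Nat.lt_trichotomy t.length tl.length with hlt | heq | hgt
  · -- ' ' :: t would be a proper suffix of ' ' :: tl, putting a space in tl
    have h1 : (' ' :: t) <:+ (' ' :: tl) :=
      List.suffix_of_suffix_length_le hs htl_suf (by simp; omega)
    obtain ⟨p, hp⟩ := h1
    cases p with
    | nil => simpa using hp
    | cons x xs =>
      have h2 := congrArg List.tail hp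
      simp only [List.cons_append, List.tail_cons] at h2
      have h3 : (' ' :: t) <:+ tl := ⟨xs, h2⟩
      exact absurd (h3.subset (by simp)) htl
  · -- equal lengths: equal suffixes of the same list
    have h1 : (' ' :: t) <:+ (' ' :: tl) :=
      List.suffix_of_suffix_length_le hs htl_suf (by simp [heq])
    have := List.IsSuffix.eq_of_length h1 (by simp [heq])
    simpa using this
  · -- ' ' :: tl would be a proper suffix of ' ' :: t, putting a space in t
    have h1 : (' ' :: tl) <:+ (' ' :: t) :=
      List.suffix_of_suffix_length_le htl_suf hs (by simp; omega)
    obtain ⟨p, hp⟩ := h1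
    cases p with
    | nil => simpa using hp.symm
    | cons x xs =>
      have h2 := congrArg List.tail hp
      simp only [List.cons_append, List.tail_cons] at h2
      have h3 : (' ' :: tl) <:+ t := ⟨xs, h2⟩
      exact absurd (h3.subset (by simp)) ht

-- a fold that overwrites its state on every match: if every match is k0, the result is out k0 (or init)
lemma pvFoldPick (ks : List String) (f : String → Bool) (out : String → String × String)
    (k0 : String) (init : String × String)
    (hk : ∀ t ∈ ks, f t = true → t = k0) :
    ks.foldl (fun st t => if f t then out t else st) init
      = if ks.any f then out k0 else init := by
  induction ks generalizing init with
  | nil => simp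
  | cons t ks ih =>
    simp only [List.foldl_cons, List.any_cons]
    by_cases hf : f t = true
    · have ht0 : t = k0 := hk t (List.mem_cons_self) hf
      rw [if_pos hf, ih (out t) (fun u hu => hk u (List.mem_cons_of_mem _ hu))]
      subst ht0
      by_cases ha : ks.any f = true <;> simp [hf, ha]
    · rw [if_neg hf, ih init (fun u hu => hk u (List.mem_cons_of_mem _ hu))]
      simp [hf]

lemma pvKeys_no_space : ∀ t ∈ pvKeys, ' ' ∉ t.toList := by decide

-- ===== VERDICT (by name: the statement is the Claim_ definition above) =====
theorem regex_empresa_tipo_spec : Claim_equal_regex_empresa_tipo := by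
  intro data _
  unfold Spec_regex_empresa_tipo regex_empresa_tipo regex_empresa_tipo_alt
  cases hr : pvRpartSpace data.toList with
  | none =>
    -- no space in data: no key matches, both return (data, "")
    have hnos := pvRpart_none hr
    have hall : ∀ t ∈ pvKeys, PySem.Chars.endswith data.toList (' ' :: t.toList) = false := by
      intro t _
      by_contra hf
      have hs := (PySem.Chars.endswith_iff _ _).mp (by simpa using hf)
      exact hnos (hs.subset (by simp))
    rw [pvFoldPick pvKeys _ _ "" (data, "") (fun t ht hf => absurd hf (by simp [hall t ht]))]
    have hany : (pvKeys.any fun t => PySem.Chars.endswith data.toList (' ' :: t.toList)) = false := by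
      rw [List.any_eq_false]; intro t ht; simp [hall t ht]
    simp [hany]
  | some p =>
    obtain ⟨h, tl⟩ := p
    obtain ⟨hl, hnotl⟩ := pvRpart_some hr
    have hktl : (String.ofList tl).toList = tl := by simp
    by_cases hmem : (String.ofList tl) ∈ pvKeys
    · -- the last token is a key: exactly that key matches in A's loop
      have honly : ∀ t ∈ pvKeys, PySem.Chars.endswith data.toList (' ' :: t.toList) = true →
          t = String.ofList tl := by
        intro t htm hf
        have hs := (PySem.Chars.endswith_iff _ _).mp hf
        rw [hl] at hs
        have heq := pvSuffix_unique hnotl (pvKeys_no_space t htm) hs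
        apply String.ext
        rw [hktl, heq]
      rw [pvFoldPick pvKeys _ _ (String.ofList tl) (data, "") honly]
      have hfk : PySem.Chars.endswith data.toList (' ' :: (String.ofList tl).toList) = true := by
        rw [PySem.Chars.endswith_iff, hktl, hl]
        exact List.suffix_append_of_suffix (List.suffix_refl _)
      have hany : (pvKeys.any fun t => PySem.Chars.endswith data.toList (' ' :: t.toList)) = true :=
        List.any_eq_true.mpr ⟨String.ofList tl, hmem, hfk⟩
      rw [if_pos hany]
      -- data[:-len(t)-1] is exactly the head before the rightmost space
      have hslice : PySem.List.slice data.toList none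
          (some (-((String.ofList tl).toList.length : Int) - 1)) = h := by
        rw [hktl]
        have hcast : -(tl.length : Int) - 1 = -((tl.length + 1 : Nat) : Int) := by push_cast; ring
        rw [hcast, PySem.List.slice_to_neg_natCast _ _ (by omega), hl]
        have hlen2 : (h ++ ' ' :: tl).length - (tl.length + 1) = h.length := by simp
        rw [hlen2, List.take_left]
      rw [hslice]
      have hdrop := PySem.List.slice_to_neg_one h
      by_cases hc : PySem.Chars.endswith h [','] = true <;>
        simp [hc, hdrop, hmem]
    · -- the last token is not a key: nothing matches, both return (data, "")
      have hall : ∀ t ∈ pvKeys, PySem.Chars.endswith data.toList (' ' :: t.toList) = false := by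
        intro t htm
        by_contra hf
        have hs := (PySem.Chars.endswith_iff _ _).mp (by simpa using hf)
        rw [hl] at hs
        have heq := pvSuffix_unique hnotl (pvKeys_no_space t htm) hs
        exact hmem (by rw [← heq, String.ofList_toList]; exact htm)
      rw [pvFoldPick pvKeys _ _ "" (data, "") (fun t ht hf => absurd hf (by simp [hall t ht]))]
      have hany : (pvKeys.any fun t => PySem.Chars.endswith data.toList (' ' :: t.toList)) = false := by
        rw [List.any_eq_false]; intro t ht; simp [hall t ht]
      simp [hany, hmem]
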